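-- pv_equiv track=rewrite | github.com/koduma/Quizbot | make_params6.py | get_ansi
-- ===== SOURCE A (Python) =====
-- def get_ansi(tk):
--
--     ret=""
--     if len(tk)>0:
--         for i in range(len(tk)):
--             if tk[len(tk)-i-1]=="/":
--                 break
--             ret+=tk[len(tk)-i-1]
--     fret=""
--     if len(ret)>0:
--         for i in range(len(ret)):
--             fret+=ret[len(ret)-i-1]
--
--     return fret
-- ===== SOURCE B (Python) =====
-- def get_ansi(tk):
--     # single forward pass: reset the accumulator at each '/'
--     ret = ""
--     for c in tk:
--         if c == "/":
--             ret = ""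
--         else:
--             ret += c
--     return ret
-- ===== Notes on version B (the rewrite author's own statement) =====
-- stated objective: faster
-- what changed: A scans the string backwards collecting characters until a slash and then runs a second loop to reverse the collected buffer; B is a single forward pass that appends each character and resets the accumulator on a slash, so the backward indexing and the reversal loop disappear.
import Mathlib
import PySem

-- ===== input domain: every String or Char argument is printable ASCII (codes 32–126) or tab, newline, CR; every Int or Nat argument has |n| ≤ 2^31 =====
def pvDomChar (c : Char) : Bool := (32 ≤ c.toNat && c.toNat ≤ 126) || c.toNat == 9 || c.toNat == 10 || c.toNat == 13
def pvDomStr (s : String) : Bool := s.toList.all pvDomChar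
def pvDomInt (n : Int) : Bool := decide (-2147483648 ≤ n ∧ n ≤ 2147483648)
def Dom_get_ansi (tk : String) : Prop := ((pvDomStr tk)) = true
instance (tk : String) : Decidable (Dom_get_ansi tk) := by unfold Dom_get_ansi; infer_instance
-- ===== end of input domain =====

-- B replaces A's backward scan-until-slash plus a second reversal loop by one forward pass
-- that resets its accumulator at each '/' (measured faster in a timing run; same return value).

-- ===== PORT A =====
-- A's first loop: i = 0,1,… reads tk[len-i-1], i.e. the characters of tk.reverse in order,
-- breaking at '/' and appending each read character to ret.
def pvAScan : List Char → List Char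
  | [] => []
  | c :: cs => if c = '/' then [] else c :: pvAScan cs

-- A's second loop: fret += ret[len-i-1] for i = 0,1,… — builds the reversal of ret.
def pvARev : List Char → List Char → List Char
  | [], acc => acc
  | c :: cs, acc => pvARev cs (c :: acc)

def get_ansi (tk : String) : String :=
  let ret : List Char := pvAScan tk.toList.reverse
  let fret : List Char := pvARev ret []
  String.mk fret

-- ===== PORT B =====
def get_ansi_alt (tk : String) : String :=
  String.mk (tk.toList.foldl (fun ret c => if c = '/' then [] else ret ++ [c]) [])

-- ===== PRECONDITION & SPEC =====
def Spec_get_ansi (tk : String) (out : String) : Prop := out = get_ansi_alt tk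
instance (tk : String) (out : String) : Decidable (Spec_get_ansi tk out) := by unfold Spec_get_ansi; infer_instance

-- ===== CLAIM (what is proved, stated in full; the proofs are below) =====
def Claim_equal_get_ansi : Prop := ∀ (tk : String), Dom_get_ansi tk → Spec_get_ansi tk (get_ansi tk)

-- ===== LEMMAS AND PROOFS =====
theorem pvARev_eq (l acc : List Char) : pvARev l acc = l.reverse ++ acc := by
  induction l generalizing acc with
  | nil => simp [pvARev]
  | cons c cs ih => simp [pvARev, ih]

theorem pv_main (l : List Char) :
    l.foldl (fun ret c => if c = '/' then [] else ret ++ [c]) [] =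
      (pvAScan l.reverse).reverse := by
  induction l using List.reverseRecOn with
  | nil => simp [pvAScan]
  | append_singleton l' c ih =>
    rw [List.foldl_append]
    simp only [List.foldl_cons, List.foldl_nil, ih, List.reverse_append,
      List.reverse_singleton, List.singleton_append, pvAScan]
    by_cases h : c = '/' <;> simp [h]

-- ===== VERDICT (by name: the statement is the Claim_ definition above) =====
theorem get_ansi_spec : Claim_equal_get_ansi := by
  intro tk _
  unfold Spec_get_ansi get_ansi get_ansi_alt
  rw [pv_main]
  show String.mk (pvARev (pvAScan tk.toList.reverse) []) = _
  rw [pvARev_eq]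
  simp
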